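-- pv_equiv track=rewrite | github.com/Zlqq123/rtm | hist_func.py | hist_con_dis
-- ===== SOURCE A (Python) =====
-- def hist_con_dis(input_data1,input_data2,interval1):
--     result=[]
--     n=len(interval1)-1
--     res1=[]
--     for i in range(n):
--         block=str(interval1[i])+'~'+str(interval1[i+1])
--         result.append(block)
--         dic={}
--         for k in (range(len(input_data1))):
--             value1=input_data1[k]
--             value2=input_data2[k]
--             if value1>=interval1[i] and value1<interval1[i+1]:
--                 dic[value2]=dic.get(value2,0)+1
--         res1.append(dic)
--
--     return result,res1
-- ===== SOURCE B (Python) =====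
-- def hist_con_dis(input_data1, input_data2, interval1):
--     # Pre-aggregate the data once: an insertion-ordered counter of (value1, value2)
--     # pairs; each bin then folds over the distinct weighted groups instead of the raw data.
--     groups = {}
--     for p in zip(input_data1, input_data2):
--         groups[p] = groups.get(p, 0) + 1
--     result = []
--     res1 = []
--     for lo, hi in zip(interval1, interval1[1:]):
--         result.append(str(lo) + '~' + str(hi))
--         dic = {}
--         for (v1, v2), c in groups.items():
--             if lo <= v1 < hi:
--                 dic[v2] = dic.get(v2, 0) + c
--         res1.append(dic)
--     return result, res1
-- ===== Notes on version B (the rewrite author's own statement) =====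
-- stated objective: alternative
-- what changed: B pre-aggregates the data in one pass into an insertion-ordered counter of (value1, value2) pairs and then, per bin, folds over the distinct weighted groups (adding counts), instead of A's rescan of the full raw data list by index for every bin.
-- outside the precondition, e.g. on hist_con_dis([1], [], [0, 2]): A raises IndexError, B returns (['0~2'], [{}])
import Mathlib
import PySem

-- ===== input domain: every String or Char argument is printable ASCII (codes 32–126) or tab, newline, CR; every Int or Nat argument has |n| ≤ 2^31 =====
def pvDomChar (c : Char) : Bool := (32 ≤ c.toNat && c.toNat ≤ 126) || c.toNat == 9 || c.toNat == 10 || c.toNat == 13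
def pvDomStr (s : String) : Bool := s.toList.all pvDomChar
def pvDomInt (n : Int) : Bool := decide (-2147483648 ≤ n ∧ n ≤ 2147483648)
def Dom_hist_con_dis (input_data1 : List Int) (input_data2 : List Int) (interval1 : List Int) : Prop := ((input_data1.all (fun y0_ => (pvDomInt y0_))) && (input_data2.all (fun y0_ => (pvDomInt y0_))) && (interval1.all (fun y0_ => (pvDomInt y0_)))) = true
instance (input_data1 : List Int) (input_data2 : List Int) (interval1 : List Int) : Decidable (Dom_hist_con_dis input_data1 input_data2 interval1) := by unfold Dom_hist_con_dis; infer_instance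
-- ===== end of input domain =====

-- B pre-aggregates the data once into an insertion-ordered counter of (value1, value2)
-- pairs and folds the distinct weighted groups per bin, instead of A's full rescan per bin.

-- ===== PORT A =====
-- literal transliteration of A: for each bin index i, scan all of the data by index,
-- counting value2 occurrences whose value1 falls in [interval1[i], interval1[i+1]).
def hist_con_dis (input_data1 : List Int) (input_data2 : List Int) (interval1 : List Int) : List String × (List (List (Int × Int))) :=
  let n : Int := (PySem.List.len interval1) - 1
  let st := (PySem.List.pyRange 0 n 1).foldl
    (fun (acc : List String × List (PySem.Dict Int Int)) i =>
      let block := PySem.Int.toStr (PySem.List.pyGetD interval1 i 0) ++ "~" ++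
                   PySem.Int.toStr (PySem.List.pyGetD interval1 (i + 1) 0)
      let result := acc.1 ++ [block]
      let dic := (PySem.List.pyRange 0 (PySem.List.len input_data1) 1).foldl
        (fun (dic : PySem.Dict Int Int) k =>
          let value1 := PySem.List.pyGetD input_data1 k 0
          let value2 := PySem.List.pyGetD input_data2 k 0
          if value1 ≥ PySem.List.pyGetD interval1 i 0 ∧ value1 < PySem.List.pyGetD interval1 (i + 1) 0 then
            dic.insert value2 (dic.getD value2 0 + 1)
          else dic)
        PySem.Dict.empty
      (result, acc.2 ++ [dic]))
    ([], [])
  (st.1, st.2.map PySem.Dict.items)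

-- ===== PORT B =====
-- literal transliteration of B: one pass builds groups = ordered counter of the
-- (value1, value2) pairs; each bin folds over groups.items, adding each group's count.
def hist_con_dis_alt (input_data1 : List Int) (input_data2 : List Int) (interval1 : List Int) : List String × (List (List (Int × Int))) :=
  let groups := (input_data1.zip input_data2).foldl
    (fun (g : PySem.Dict (Int × Int) Int) p => g.insert p (g.getD p 0 + 1)) PySem.Dict.empty
  let st := (interval1.zip (PySem.List.slice interval1 (some 1) none)).foldl
    (fun (acc : List String × List (PySem.Dict Int Int)) b =>
      let label := PySem.Int.toStr b.1 ++ "~" ++ PySem.Int.toStr b.2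
      let dic := groups.items.foldl
        (fun (dic : PySem.Dict Int Int) q =>
          if b.1 ≤ q.1.1 ∧ q.1.1 < b.2 then dic.insert q.1.2 (dic.getD q.1.2 0 + q.2) else dic)
        PySem.Dict.empty
      (acc.1 ++ [label], acc.2 ++ [dic]))
    ([], [])
  (st.1, st.2.map PySem.Dict.items)

-- ===== PRECONDITION & SPEC =====
-- Pre_ excludes exactly the inputs on which A raises IndexError: input_data2 shorter
-- than input_data1 while interval1 yields at least one bin (A never reads input_data2 otherwise).
def Pre_hist_con_dis (input_data1 : List Int) (input_data2 : List Int) (interval1 : List Int) : Prop :=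
  input_data1.length ≤ input_data2.length ∨ interval1.length < 2
instance (input_data1 : List Int) (input_data2 : List Int) (interval1 : List Int) : Decidable (Pre_hist_con_dis input_data1 input_data2 interval1) := by unfold Pre_hist_con_dis; infer_instance
def pvWitness_hist_con_dis : List Int × List Int × List Int := ([1, 3, 2], [7, 7, 8], [0, 2, 4])
def Spec_hist_con_dis (input_data1 : List Int) (input_data2 : List Int) (interval1 : List Int) (out : List String × (List (List (Int × Int)))) : Prop := out = hist_con_dis_alt input_data1 input_data2 interval1
instance (input_data1 : List Int) (input_data2 : List Int) (interval1 : List Int) (out : List String × (List (List (Int × Int)))) : Decidable (Spec_hist_con_dis input_data1 input_data2 interval1 out) := by unfold Spec_hist_con_dis; infer_instance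

-- ===== CLAIM (what is proved, stated in full; the proofs are below) =====
def Claim_equal_hist_con_dis : Prop := ∀ (input_data1 : List Int) (input_data2 : List Int) (interval1 : List Int), Dom_hist_con_dis input_data1 input_data2 interval1 → Pre_hist_con_dis input_data1 input_data2 interval1 → Spec_hist_con_dis input_data1 input_data2 interval1 (hist_con_dis input_data1 input_data2 interval1)

-- ===== LEMMAS AND PROOFS =====

-- A pair-of-appends foldl is a pair of maps.
theorem pv_foldl_pair_append {α β γ : Type} (l : List α) (f : α → β) (g : α → γ) :
    ∀ (r : List β) (s : List γ),
      l.foldl (fun acc i => (acc.1 ++ [f i], acc.2 ++ [g i])) (r, s) = (r ++ l.map f, s ++ l.map g) := by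
  induction l with
  | nil => intro r s; simp
  | cons x xs ih => intro r s; simp [List.foldl_cons, ih]

-- A fold over indices reading two lists equals a fold over their zip.
theorem pv_foldl_range_two {σ : Type} (d1 d2 : List Int) (h : d1.length ≤ d2.length)
    (f : σ → Int → Int → σ) (init : σ) :
    (PySem.List.pyRange 0 (PySem.List.len d1) 1).foldl
        (fun acc k => f acc (PySem.List.pyGetD d1 k 0) (PySem.List.pyGetD d2 k 0)) init
      = (d1.zip d2).foldl (fun acc p => f acc p.1 p.2) init := by
  have hlen : (d1.zip d2).length = d1.length := by simp [List.length_zip]; omega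
  have := PySem.List.foldl_pyRange_zero_pyGetD (d1.zip d2) ((0 : Int), (0 : Int))
      (fun acc p => f acc p.1 p.2) init
  rw [← this]
  simp only [PySem.List.len_eq, hlen]
  apply PySem.List.foldl_congr_mem
  intro a k hk
  have hk' := (PySem.List.mem_pyRange_one).1 hk
  have h0 : 0 ≤ k := hk'.1
  have h1 : k < (d1.length : Int) := hk'.2
  have hknat : k.toNat < d1.length := by omega
  rw [PySem.List.pyGetD_eq_getElem d1 0 h0 (by simpa using h1),
      PySem.List.pyGetD_eq_getElem d2 0 h0 (by omega),
      PySem.List.pyGetD_eq_getElem (d1.zip d2) ((0:Int),(0:Int)) h0 (by rw [hlen]; exact_mod_cast h1)]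
  simp [List.getElem_zip]

-- The index map over bins equals zipping interval1 with its tail.
theorem pv_range_zip (iv : List Int) :
    (PySem.List.pyRange 0 ((PySem.List.len iv) - 1) 1).map
        (fun i => (PySem.List.pyGetD iv i 0, PySem.List.pyGetD iv (i + 1) 0))
      = iv.zip iv.tail := by
  refine List.ext_getElem ?_ ?_
  · simp [PySem.List.length_pyRange_one, List.length_zip]
  · intro k hk1 hk2
    have hklen : k < iv.length - 1 := by
      simpa [PySem.List.length_pyRange_one] using hk1
    have hk1' : k < (PySem.List.pyRange 0 ((PySem.List.len iv) - 1) 1).length := by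
      simpa using hk1
    have hget : (PySem.List.pyRange 0 ((PySem.List.len iv) - 1) 1)[k]'hk1' = (k : Int) := by
      rw [PySem.List.getElem_pyRange_one]; ring
    simp only [List.getElem_map, hget]
    have e1 : PySem.List.pyGetD iv (k : Int) 0 = iv[k]'(by omega) := by
      rw [PySem.List.pyGetD_eq_getElem iv 0 (by omega) (by omega)]
      simp
    have e2 : PySem.List.pyGetD iv ((k : Int) + 1) 0 = iv[k + 1]'(by omega) := by
      rw [PySem.List.pyGetD_eq_getElem iv 0 (by omega) (by omega)]
      simp only [show ((k : Int) + 1).toNat = k + 1 from by omega]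
    rw [e1, e2, List.getElem_zip]
    simp [List.getElem_tail]

-- sum over a list not containing a of the a-indicator is 0.
theorem pv_sum_ind_zero {α : Type} [BEq α] [LawfulBEq α] (s : List α) (a : α) (h : a ∉ s) :
    (s.map (fun x => if a == x then (1 : Int) else 0)).sum = 0 := by
  induction s with
  | nil => simp
  | cons x xs ih =>
    have hx : (a == x) = false := beq_eq_false_iff_ne.2 (fun e => h (e ▸ List.mem_cons_self))
    simp only [List.map_cons, List.sum_cons, hx, Bool.false_eq_true, if_false,
      ih (fun m => h (List.mem_cons_of_mem x m)), add_zero]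

-- sum over a nodup list containing a of the a-indicator is 1.
theorem pv_sum_ind_one {α : Type} [BEq α] [LawfulBEq α] (s : List α) (a : α)
    (hnd : s.Nodup) (h : a ∈ s) :
    (s.map (fun x => if a == x then (1 : Int) else 0)).sum = 1 := by
  induction s with
  | nil => simp at h
  | cons x xs ih =>
    rcases List.mem_cons.1 h with he | hm
    · have hx : (a == x) = true := by simp [he]
      have ha : a ∉ xs := by rw [he]; exact (List.nodup_cons.1 hnd).1
      simp only [List.map_cons, List.sum_cons, hx, if_true, pv_sum_ind_zero xs a ha, add_zero]
    · have hxa : (a == x) = false := beq_eq_false_iff_ne.2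
        (fun e => (List.nodup_cons.1 hnd).1 (e ▸ hm))
      simp only [List.map_cons, List.sum_cons, hxa, Bool.false_eq_true, if_false,
        ih (List.nodup_cons.1 hnd).2 hm, zero_add]

-- getD of a weighted insert-add fold: initial value plus the sum of the weights at that key.
theorem pv_getD_weighted_fold {α κ : Type} [BEq α] [LawfulBEq α] [BEq κ] [LawfulBEq κ]
    (key : α → κ) (w : α → Int) (s : List α) :
    ∀ (d : PySem.Dict κ Int) (k : κ),
      (s.foldl (fun d x => d.insert (key x) (d.getD (key x) 0 + w x)) d).getD k 0
        = d.getD k 0 + ((s.filter (fun x => key x == k)).map w).sum := by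
  induction s with
  | nil => intro d k; simp
  | cons x xs ih =>
    intro d k
    simp only [List.foldl_cons, ih, List.filter_cons]
    by_cases hkx : k = key x
    · subst hkx
      rw [PySem.Dict.getD_insert_self]
      simp only [beq_self_eq_true, if_true, List.map_cons, List.sum_cons]
      ring
    · have hb : (key x == k) = false := beq_eq_false_iff_ne.2 (fun h => hkx h.symm)
      rw [PySem.Dict.getD_insert_of_ne d _ _ hkx]
      simp [hb]

-- items of a weighted insert-add fold from empty: the distinct keys in first-occurrence
-- order, each with the sum of the weights mapped to it.
theorem pv_items_weighted_fold {α κ : Type} [BEq α] [LawfulBEq α] [BEq κ] [LawfulBEq κ]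
    (key : α → κ) (w : α → Int) (s : List α) :
    (s.foldl (fun (d : PySem.Dict κ Int) x => d.insert (key x) (d.getD (key x) 0 + w x)) PySem.Dict.empty).items
      = (PySem.Set.ofList (s.map key)).map
          (fun k => (k, ((s.filter (fun x => key x == k)).map w).sum)) := by
  have hkeys : (s.foldl (fun (d : PySem.Dict κ Int) x => d.insert (key x) (d.getD (key x) 0 + w x)) PySem.Dict.empty).keys
      = PySem.Set.ofList (s.map key) := by
    rw [PySem.Dict.keys_foldl_insert_key]
    rfl
  have hnd : (s.foldl (fun (d : PySem.Dict κ Int) x => d.insert (key x) (d.getD (key x) 0 + w x)) PySem.Dict.empty).keys.Nodup := by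
    rw [hkeys]; exact PySem.Set.nodup_ofList _
  rw [PySem.Dict.items_eq_map_keys _ hnd 0, hkeys]
  apply List.map_congr_left
  intro k _
  rw [pv_getD_weighted_fold key w s PySem.Dict.empty k]
  simp

-- dedup commutes with filter.
theorem pv_ofList_filter {α : Type} [BEq α] [LawfulBEq α] (Q : α → Bool) (l : List α) :
    PySem.Set.ofList (l.filter Q) = (PySem.Set.ofList l).filter Q := by
  induction l using List.reverseRecOn with
  | nil => simp [PySem.Set.ofList_nil]
  | append_singleton l a ih =>
    rw [List.filter_append, PySem.Set.ofList_append_singleton, PySem.Set.add_eq_ite]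
    by_cases hQ : Q a = true
    · have hfa : List.filter Q [a] = [a] := by simp [hQ]
      rw [hfa, PySem.Set.ofList_append_singleton, PySem.Set.add_eq_ite, ih]
      by_cases hm : a ∈ PySem.Set.ofList l
      · rw [if_pos (List.mem_filter.2 ⟨hm, hQ⟩), if_pos hm]
      · rw [if_neg (fun h => hm (List.mem_filter.1 h).1), if_neg hm, List.filter_append, hfa]
    · have hfa : List.filter Q [a] = [] := by simp [hQ]
      rw [hfa, List.append_nil, ih]
      by_cases hm : a ∈ PySem.Set.ofList l
      · rw [if_pos hm]
      · rw [if_neg hm, List.filter_append, hfa, List.append_nil]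

-- dedup absorbs an inner dedup under map.
theorem pv_ofList_map_ofList {α β : Type} [BEq α] [LawfulBEq α] [BEq β] [LawfulBEq β] (f : α → β) (s : List α) :
    PySem.Set.ofList ((PySem.Set.ofList s).map f) = PySem.Set.ofList (s.map f) := by
  induction s using List.reverseRecOn with
  | nil => simp [PySem.Set.ofList_nil]
  | append_singleton s a ih =>
    rw [PySem.Set.ofList_append_singleton, PySem.Set.add_eq_ite, List.map_append]
    by_cases hm : a ∈ PySem.Set.ofList s
    · rw [if_pos hm, ih, show List.map f [a] = [f a] from rfl,
          PySem.Set.ofList_append_singleton,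
          PySem.Set.add_of_mem (by
            rw [PySem.Set.mem_ofList] at hm ⊢
            exact List.mem_map_of_mem hm)]
    · rw [if_neg hm, List.map_append, show List.map f [a] = [f a] from rfl,
          PySem.Set.ofList_append_singleton, PySem.Set.ofList_append_singleton, ih]

-- sum of the multiplicities over the distinct elements is the length.
theorem pv_sum_count_ofList {α : Type} [BEq α] [LawfulBEq α] (t : List α) :
    ((PySem.Set.ofList t).map (fun x => (t.count x : Int))).sum = (t.length : Int) := by
  induction t using List.reverseRecOn with
  | nil => simp [PySem.Set.ofList_nil]
  | append_singleton t a ih =>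
    rw [PySem.Set.ofList_append_singleton, PySem.Set.add_eq_ite]
    have hcnt : ∀ x : α, ((t ++ [a]).count x : Int)
        = (t.count x : Int) + (if a == x then (1 : Int) else 0) := by
      intro x
      rw [List.count_append]
      have : List.count x [a] = if a == x then 1 else 0 := by
        rw [show ([a] : List α) = a :: [] from rfl, List.count_cons, List.count_nil, Nat.zero_add]
      rw [this]
      by_cases hax : (a == x) = true <;> simp [hax]
    by_cases hm : a ∈ PySem.Set.ofList t
    · rw [if_pos hm]
      calc ((PySem.Set.ofList t).map (fun x => ((t ++ [a]).count x : Int))).sum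
          = ((PySem.Set.ofList t).map (fun x => (t.count x : Int) + (if a == x then (1 : Int) else 0))).sum := by
            exact congrArg List.sum (List.map_congr_left (fun x _ => hcnt x))
        _ = ((PySem.Set.ofList t).map (fun x => (t.count x : Int))).sum
            + ((PySem.Set.ofList t).map (fun x => if a == x then (1 : Int) else 0)).sum :=
            List.sum_map_add
        _ = (t.length : Int) + 1 := by
            rw [ih, pv_sum_ind_one _ a (PySem.Set.nodup_ofList t) hm]
        _ = ((t ++ [a]).length : Int) := by simp
    · rw [if_neg hm]
      have ha : a ∉ t := fun h => hm ((PySem.Set.mem_ofList t a).2 h)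
      rw [List.map_append, List.sum_append]
      have h1 : ((PySem.Set.ofList t).map (fun x => ((t ++ [a]).count x : Int))).sum
          = (t.length : Int) := by
        have hcg : ∀ x ∈ PySem.Set.ofList t, ((t ++ [a]).count x : Int) = (t.count x : Int) := by
          intro x hx
          have hax : (a == x) = false := beq_eq_false_iff_ne.2
            (fun e => ha (e ▸ (PySem.Set.mem_ofList t x).1 hx))
          rw [hcnt x, hax]
          simp
        rw [List.map_congr_left hcg, ih]
      have h2 : (([a] : List α).map (fun x => ((t ++ [a]).count x : Int))).sum = 1 := by
        simp only [List.map_cons, List.map_nil, List.sum_cons, List.sum_nil, add_zero]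
        rw [hcnt a, List.count_eq_zero.2 ha]
        simp
      rw [h1, h2]
      simp

-- MAIN LEMMA: the per-bin count over the raw data equals the weighted fold over the
-- distinct groups (the counter's items), as insertion-ordered dicts.
theorem pv_fold_eq_groups_fold {α κ : Type} [BEq α] [LawfulBEq α] [BEq κ] [LawfulBEq κ]
    (key : α → κ) (P : α → Bool) (l : List α) :
    l.foldl (fun (d : PySem.Dict κ Int) x => if P x then d.insert (key x) (d.getD (key x) 0 + 1) else d) PySem.Dict.empty
      = (PySem.Dict.counter l).items.foldl
          (fun (d : PySem.Dict κ Int) q => if P q.1 then d.insert (key q.1) (d.getD (key q.1) 0 + q.2) else d)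
          PySem.Dict.empty := by
  rw [PySem.Dict.items_counter, List.foldl_map, ← List.foldl_filter, ← List.foldl_filter]
  apply PySem.Dict.ext
  rw [pv_items_weighted_fold key (fun _ => (1 : Int)) (l.filter P),
      pv_items_weighted_fold key (fun x => (l.count x : Int)) ((PySem.Set.ofList l).filter P)]
  have hsets : PySem.Set.ofList (((PySem.Set.ofList l).filter P).map key)
      = PySem.Set.ofList ((l.filter P).map key) := by
    rw [← pv_ofList_filter P l, pv_ofList_map_ofList]
  rw [hsets]
  apply List.map_congr_left
  intro k _
  refine congrArg (Prod.mk k) ?_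
  -- combine the two filters into one predicate
  have hLf : (l.filter P).filter (fun x => key x == k) = l.filter (fun x => key x == k && P x) := by
    rw [List.filter_filter]
  have hRf : ((PySem.Set.ofList l).filter P).filter (fun x => key x == k)
      = PySem.Set.ofList (l.filter (fun x => key x == k && P x)) := by
    rw [← pv_ofList_filter P l, ← pv_ofList_filter (fun x => key x == k) (l.filter P), hLf]
  rw [hLf, hRf]
  set t := l.filter (fun x => key x == k && P x) with ht
  -- left side: sum of ones = length
  have hones : (t.map (fun _ => (1 : Int))).sum = (t.length : Int) := by
    rw [List.map_const', List.sum_replicate]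
    simp
  rw [hones]
  -- right side: counts in l of elements of t equal counts in t
  have hcnt : ∀ x ∈ PySem.Set.ofList t, (l.count x : Int) = (t.count x : Int) := by
    intro x hx
    rw [PySem.Set.mem_ofList] at hx
    have hQ : (key x == k && P x) = true := (List.mem_filter.1 hx).2
    have h3 : List.count x t = List.count x l := List.count_filter hQ
    exact_mod_cast h3.symm
  rw [List.map_congr_left hcnt, pv_sum_count_ofList]

-- ===== VERDICT (by name: the statement is the Claim_ definition above) =====
theorem hist_con_dis_spec : Claim_equal_hist_con_dis := by
  intro d1 d2 iv _ hpre
  unfold Spec_hist_con_dis hist_con_dis hist_con_dis_alt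
  simp only []
  rw [pv_foldl_pair_append, pv_foldl_pair_append, PySem.List.slice_from_one, ← pv_range_zip iv]
  simp only [List.nil_append, List.map_map]
  rw [Prod.mk.injEq]
  constructor
  · apply List.map_congr_left
    intro i _
    simp [Function.comp]
  · apply List.map_congr_left
    intro i hi
    have hiv : 2 ≤ iv.length := by
      have := (PySem.List.mem_pyRange_one).1 hi
      simp only [PySem.List.len_eq] at this
      omega
    have hlen : d1.length ≤ d2.length := by
      cases hpre with
      | inl h => exact h
      | inr h => omega
    refine congrArg PySem.Dict.items ?_
    simp only [Function.comp]
    rw [pv_foldl_range_two d1 d2 hlen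
      (fun (dic : PySem.Dict Int Int) v1 v2 => if v1 ≥ PySem.List.pyGetD iv i 0 ∧ v1 < PySem.List.pyGetD iv (i + 1) 0 then dic.insert v2 (dic.getD v2 0 + 1) else dic)
      PySem.Dict.empty]
    rw [PySem.Dict.foldl_insert_getD_add_one_eq_counter]
    have h := pv_fold_eq_groups_fold (κ := Int) (fun p : Int × Int => p.2)
      (fun p => decide (PySem.List.pyGetD iv i 0 ≤ p.1 ∧ p.1 < PySem.List.pyGetD iv (i + 1) 0)) (d1.zip d2)
    simpa [ge_iff_le] using h
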